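-- pv_equiv track=rewrite | github.com/bhadraakshay/2048-Game | 2048.py | up_movement
-- ===== SOURCE A (Python) =====
-- def up_movement(game_box): #function for up movement
--     j=0
--     moved=False
--     for i in range(0,4): #looping through all the columns
--
--         if game_box[i][j]!=0 or game_box[i][j+1]!=0 or game_box[i][j+2]!=0 or game_box[i][j+3]!=0:
--             if game_box[i][j]==0:
--                 while game_box[i][j]==0:
--                     game_box[i][j]=game_box[i][j+1]
--                     game_box[i][j+1]=game_box[i][j+2]
--                     game_box[i][j+2] = game_box[i][j+3]
--                     game_box[i][j+3]=0
--                     moved=True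
--
--             if game_box[i][j+1]==0 and (game_box[i][j+2]!=0 or game_box[i][j+3]!=0):
--                 while game_box[i][j+1]==0:
--                     game_box[i][j+1]=game_box[i][j+2]
--                     game_box[i][j+2]=game_box[i][j+3]
--                     game_box[i][j+3]=0
--                     moved=True
--
--             if game_box[i][j+2]==0 and (game_box[i][j+3]!=0):
--                 while game_box[i][j+2]==0:
--                     game_box[i][j+2]=game_box[i][j+3]
--                     game_box[i][j+3]=0
--                     moved=True
--     return moved
-- ===== SOURCE B (Python) =====
-- def up_movement(game_box):  # compact each row's first 4 cells leftwards; moved iff any row changed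
--     moved = False
--     for i in range(4):
--         head = game_box[i][:4]
--         compacted = [x for x in head if x != 0]
--         compacted += [0] * (4 - len(compacted))
--         if compacted != head:
--             moved = True
--             game_box[i][:4] = compacted
--     return moved
-- ===== Notes on version B (the rewrite author's own statement) =====
-- stated objective: simpler
-- what changed: Replaces A's three guarded shift-while-loops per row by a single filter-and-pad compaction per row, with moved set iff the compacted row differs from the original; Pre_ excludes out-of-spec boards (fewer than 4 rows or a short row among the first 4), on which A raises IndexError or, only thanks to short-circuit evaluation of its guards, happens to return a value.
-- outside the precondition, e.g. on up_movement([[7, 1, 2], [1, 8, 8], [2, 1, -1], [7, 2, 7], [8, 8, -1]]): A returns False, B returns True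
import Mathlib
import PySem

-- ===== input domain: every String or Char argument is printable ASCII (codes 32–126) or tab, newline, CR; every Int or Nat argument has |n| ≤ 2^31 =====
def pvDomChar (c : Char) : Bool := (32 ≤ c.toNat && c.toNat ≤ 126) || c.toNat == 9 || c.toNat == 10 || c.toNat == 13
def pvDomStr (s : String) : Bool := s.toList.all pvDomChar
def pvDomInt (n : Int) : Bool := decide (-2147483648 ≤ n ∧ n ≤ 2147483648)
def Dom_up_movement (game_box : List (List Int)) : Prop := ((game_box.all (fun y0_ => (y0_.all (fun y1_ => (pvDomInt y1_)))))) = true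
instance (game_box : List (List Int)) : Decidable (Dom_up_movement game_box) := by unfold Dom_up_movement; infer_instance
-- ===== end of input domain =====

-- B replaces A's three guarded shift-while-loops per row by a one-pass filter-and-pad row
-- compaction, setting moved iff the compacted row differs (objective: simpler).
-- Both Pythons mutate game_box in place to the same final board; the theorems are about the
-- return value only.

-- ===== PORT A =====
-- 'while game_box[i][j]==0: …' — the fuel argument (4) only makes the loop total; under the
-- guards of A it is never exhausted (the while shifts a nonzero cell to the front in ≤ 3 steps).
def pvShiftA : Nat → (Int × Int × Int × Int) → Bool → ((Int × Int × Int × Int) × Bool)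
  | 0, s, m => (s, m)
  | n+1, (a, b, c, d), m => if a = 0 then pvShiftA n (b, c, d, 0) true else ((a, b, c, d), m)

def pvShiftB : Nat → (Int × Int × Int) → Bool → ((Int × Int × Int) × Bool)
  | 0, s, m => (s, m)
  | n+1, (b, c, d), m => if b = 0 then pvShiftB n (c, d, 0) true else ((b, c, d), m)

def pvShiftC : Nat → (Int × Int) → Bool → ((Int × Int) × Bool)
  | 0, s, m => (s, m)
  | n+1, (c, d), m => if c = 0 then pvShiftC n (d, 0) true else ((c, d), m)

-- one iteration of A's 'for i in range(0,4)' body on row game_box[i]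
def pvRowA (m : Bool) (r : List Int) : Bool :=
  match r with
  | a :: b :: c :: d :: _ =>
    if a ≠ 0 ∨ b ≠ 0 ∨ c ≠ 0 ∨ d ≠ 0 then
      let s1 := if a = 0 then pvShiftA 4 (a, b, c, d) m else ((a, b, c, d), m)
      match s1 with
      | ((_, b, c, d), m) =>
        let s2 := if b = 0 ∧ (c ≠ 0 ∨ d ≠ 0) then pvShiftB 4 (b, c, d) m else ((b, c, d), m)
        match s2 with
        | ((_, c, d), m) =>
          let s3 := if c = 0 ∧ d ≠ 0 then pvShiftC 4 (c, d) m else ((c, d), m)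
          s3.2
    else m
  | _ => m  -- Python raises IndexError here; excluded by Pre_up_movement

def up_movement (game_box : List (List Int)) : Bool :=
  (PySem.List.pyRange 0 4 1).foldl
    (fun m i => pvRowA m ((PySem.List.pyGet? game_box i).getD [])) false

-- ===== PORT B =====
-- one iteration of B's loop body: compact head = game_box[i][:4], moved |= (compacted ≠ head)
def pvRowB (m : Bool) (r : List Int) : Bool :=
  let head := r.take 4
  let comp := head.filter (fun x => x ≠ 0)
  let comp := comp ++ List.replicate (4 - comp.length) 0
  if comp ≠ head then true else m

def up_movement_alt (game_box : List (List Int)) : Bool :=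
  (PySem.List.pyRange 0 4 1).foldl
    (fun m i => pvRowB m ((PySem.List.pyGet? game_box i).getD [])) false

-- ===== PRECONDITION & SPEC =====
-- Pre_ excludes out-of-spec boards (fewer than 4 rows, or a short row among the first 4): on
-- those A raises IndexError, or only thanks to short-circuit evaluation of its guards happens
-- to return a value for a board the game never produces.
def Pre_up_movement (game_box : List (List Int)) : Prop :=
  4 ≤ game_box.length ∧ ∀ r ∈ game_box.take 4, 4 ≤ r.length
instance (game_box : List (List Int)) : Decidable (Pre_up_movement game_box) := by
  unfold Pre_up_movement; infer_instance

def pvWitness_up_movement : List (List Int) :=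
  [[0, 2, 0, 0], [2, 0, 0, 4], [0, 0, 0, 0], [2, 4, 8, 16]]

def Spec_up_movement (game_box : List (List Int)) (out : Bool) : Prop := out = up_movement_alt game_box
instance (game_box : List (List Int)) (out : Bool) : Decidable (Spec_up_movement game_box out) := by
  unfold Spec_up_movement; infer_instance

-- ===== CLAIM (what is proved, stated in full; the proofs are below) =====
def Claim_equal_up_movement : Prop := ∀ (game_box : List (List Int)), Dom_up_movement game_box → Pre_up_movement game_box → Spec_up_movement game_box (up_movement game_box)

-- ===== LEMMAS AND PROOFS =====

lemma pvRow_eq (a b c d : Int) (rest : List Int) (m : Bool) :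
    pvRowA m (a :: b :: c :: d :: rest) = pvRowB m (a :: b :: c :: d :: rest) := by
  by_cases ha : a = 0 <;> by_cases hb : b = 0 <;> by_cases hc : c = 0 <;> by_cases hd : d = 0 <;>
    subst_vars <;>
    simp_all [pvRowA, pvRowB, pvShiftA, pvShiftB, pvShiftC, List.filter, List.replicate]

lemma pvRange4 : PySem.List.pyRange 0 4 1 = [0, 1, 2, 3] := by decide

-- ===== VERDICT (by name: the statement is the Claim_ definition above) =====
theorem up_movement_spec : Claim_equal_up_movement := by
  intro gb _ hpre
  unfold Spec_up_movement up_movement up_movement_alt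
  obtain ⟨hlen, hrows⟩ := hpre
  match gb, hlen with
  | r0 :: r1 :: r2 :: r3 :: rest, _ =>
    have h0 := hrows r0 (by simp)
    have h1 := hrows r1 (by simp)
    have h2 := hrows r2 (by simp)
    have h3 := hrows r3 (by simp)
    rw [pvRange4]
    simp only [List.foldl, PySem.List.pyGet?_zero_cons]
    have g1 : PySem.List.pyGet? (r0 :: r1 :: r2 :: r3 :: rest) 1 = some r1 := by
      rw [show (1:Int) = ((1:Nat):Int) by norm_num, PySem.List.pyGet?_natCast]; rfl
    have g2 : PySem.List.pyGet? (r0 :: r1 :: r2 :: r3 :: rest) 2 = some r2 := by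
      rw [show (2:Int) = ((2:Nat):Int) by norm_num, PySem.List.pyGet?_natCast]; rfl
    have g3 : PySem.List.pyGet? (r0 :: r1 :: r2 :: r3 :: rest) 3 = some r3 := by
      rw [show (3:Int) = ((3:Nat):Int) by norm_num, PySem.List.pyGet?_natCast]; rfl
    rw [g1, g2, g3]
    match r0, h0 with
    | a0 :: b0 :: c0 :: d0 :: t0, _ =>
    match r1, h1 with
    | a1 :: b1 :: c1 :: d1 :: t1, _ =>
    match r2, h2 with
    | a2 :: b2 :: c2 :: d2 :: t2, _ =>
    match r3, h3 with
    | a3 :: b3 :: c3 :: d3 :: t3, _ =>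
      simp only [Option.getD_some, pvRow_eq]
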